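-- pv_equiv track=rewrite | github.com/hondotanuki/competition-archive | kaggle/2024-santa/permute_sublist.py | permute_sublist
-- ===== SOURCE A (Python) =====
-- from itertools import permutations as perm
--
-- def permute_sublist(lst, start, end):
--     """
--     リストの指定範囲 [start, end) を全ての順列に並び替えたリストを生成
--     8!=40320まで、それ以降は計算量が重い
--     """
--     assert 0 < end - start < 9, "不当なインデックス"
--     sublist = lst[start:end]
--     permuted_sublists = list(perm(sublist))
--
--     solutions = []
--     for sublist in permuted_sublists:
--         new_solution = lst[:start] + list(sublist) + lst[end:]
--         solutions.append(new_solution)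
--
--     return solutions
-- ===== SOURCE B (Python) =====
-- def _kth(avail, k):
--     # k-th (0-indexed, lexicographic by position) arrangement of avail, via Lehmer-code decoding
--     if not avail:
--         return []
--     f = 1
--     for i in range(1, len(avail)):
--         f *= i
--     d, r = divmod(k, f)
--     return [avail[d]] + _kth(avail[:d] + avail[d + 1:], r)
--
--
-- def permute_sublist(lst, start, end):
--     assert 0 < end - start < 9, "不当なインデックス"
--     sub = lst[start:end]
--     total = 1
--     for i in range(2, len(sub) + 1):
--         total *= i
--     return [lst[:start] + _kth(sub, k) + lst[end:] for k in range(total)]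
-- ===== Notes on version B (the rewrite author's own statement) =====
-- stated objective: alternative
-- what changed: Replaces itertools.permutations plus a second splicing loop with direct Lehmer-code (factorial number system) decoding: for each k in range(n!) the k-th arrangement of the sublist is computed recursively by divmod against factorials, which reproduces itertools' lexicographic-by-position order and duplicate multiplicity exactly.
import Mathlib
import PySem

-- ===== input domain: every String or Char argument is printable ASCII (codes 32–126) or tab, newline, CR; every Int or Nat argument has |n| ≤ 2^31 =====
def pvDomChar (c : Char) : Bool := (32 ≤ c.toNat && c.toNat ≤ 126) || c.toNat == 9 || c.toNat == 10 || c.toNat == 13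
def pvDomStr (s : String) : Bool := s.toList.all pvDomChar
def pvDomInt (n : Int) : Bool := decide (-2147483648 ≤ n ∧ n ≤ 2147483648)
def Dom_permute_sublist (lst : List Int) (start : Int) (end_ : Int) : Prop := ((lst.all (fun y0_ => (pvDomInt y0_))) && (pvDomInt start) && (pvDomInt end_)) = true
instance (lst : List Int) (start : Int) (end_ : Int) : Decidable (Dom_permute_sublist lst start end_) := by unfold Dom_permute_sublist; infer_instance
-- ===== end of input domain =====

-- B replaces itertools.permutations with direct Lehmer-code (factorial number system) decoding of
-- the k-th arrangement for k = 0 .. n!-1, which yields exactly itertools' order and multiplicity.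

-- ===== PORT A =====
-- itertools.permutations(sublist) for the full length, ported by hand as its standard recursive
-- equivalent (pick each index left to right, recurse on the rest): exact order and multiplicity.
-- The .attach is only a termination artifact.
def pvPermsA (xs : List Int) : List (List Int) :=
  match xs with
  | [] => [[]]
  | x :: rest =>
    (List.range (x :: rest).length).attach.flatMap
      (fun i =>
        (pvPermsA ((x :: rest).take i.1 ++ (x :: rest).drop (i.1 + 1))).map
          (fun p => (x :: rest).getD i.1 0 :: p))
termination_by xs.length
decreasing_by
  have hi := i.2
  simp only [List.mem_range, List.length_cons] at hi
  simp [List.length_take, List.length_drop]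
  omega

def permute_sublist (lst : List Int) (start : Int) (end_ : Int) : List (List Int) :=
  -- assert 0 < end - start < 9 → Pre_permute_sublist
  let sublist := PySem.List.slice lst (some start) (some end_)
  let permuted_sublists := pvPermsA sublist
  permuted_sublists.foldl
    (fun solutions sub =>
      solutions ++ [PySem.List.slice lst none (some start) ++ sub ++ PySem.List.slice lst (some end_) none])
    []

-- ===== PORT B =====
-- _kth from Source B; the fuel argument (= length of avail at the top call) is only a termination
-- artifact, and `.getD 0` marks an IndexError that no reachable call performs (k is always in range).
def pvKth (fuel : Nat) (avail : List Int) (k : Int) : List Int :=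
  match fuel, avail with
  | 0, _ => []
  | _ + 1, [] => []
  | fuel + 1, a :: rest =>
    let f : Int := (PySem.List.pyRange 1 ((a :: rest).length : Int) 1).foldl (fun acc i => acc * i) 1
    let d := PySem.Int.floordiv k f
    let r := PySem.Int.mod k f
    ((PySem.List.pyGet? (a :: rest) d).getD 0) ::
      pvKth fuel
        (PySem.List.slice (a :: rest) none (some d) ++ PySem.List.slice (a :: rest) (some (d + 1)) none)
        r

def permute_sublist_alt (lst : List Int) (start : Int) (end_ : Int) : List (List Int) :=
  -- assert 0 < end - start < 9 → Pre_permute_sublist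
  let sub := PySem.List.slice lst (some start) (some end_)
  let total : Int := (PySem.List.pyRange 2 ((sub.length : Int) + 1) 1).foldl (fun acc i => acc * i) 1
  (PySem.List.pyRange 0 total 1).map
    (fun k =>
      PySem.List.slice lst none (some start) ++ pvKth sub.length sub k ++ PySem.List.slice lst (some end_) none)

-- ===== PRECONDITION & SPEC =====
-- Pre_ is exactly A's assert `0 < end - start < 9`; outside it A raises AssertionError.
def Pre_permute_sublist (lst : List Int) (start : Int) (end_ : Int) : Prop :=
  0 < end_ - start ∧ end_ - start < 9
instance (lst : List Int) (start : Int) (end_ : Int) : Decidable (Pre_permute_sublist lst start end_) := by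
  unfold Pre_permute_sublist; infer_instance

def pvWitness_permute_sublist : List Int × Int × Int := ([1, 2, 3], 0, 2)

def Spec_permute_sublist (lst : List Int) (start : Int) (end_ : Int) (out : List (List Int)) : Prop := out = permute_sublist_alt lst start end_
instance (lst : List Int) (start : Int) (end_ : Int) (out : List (List Int)) : Decidable (Spec_permute_sublist lst start end_ out) := by unfold Spec_permute_sublist; infer_instance

-- ===== CLAIM (what is proved, stated in full; the proofs are below) =====
def Claim_equal_permute_sublist : Prop := ∀ (lst : List Int) (start : Int) (end_ : Int), Dom_permute_sublist lst start end_ → Pre_permute_sublist lst start end_ → Spec_permute_sublist lst start end_ (permute_sublist lst start end_)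

-- ===== LEMMAS AND PROOFS =====

-- product of range(1, n+1) is n!
lemma pvProdRange1 : ∀ n : Nat,
    (PySem.List.pyRange 1 ((n : Int) + 1) 1).foldl (fun acc i => acc * i) 1 = (n.factorial : Int) := by
  intro n
  induction n with
  | zero => decide
  | succ m ih =>
    have h : (((m + 1 : Nat) : Int) + 1) = (1 + (m : Int)) + 1 := by push_cast; ring
    rw [h, PySem.List.pyRange_one_succ_right (by omega)]
    rw [List.foldl_append]
    simp only [List.foldl]
    rw [show (1 + (m : Int)) = ((m : Int) + 1) by ring] at *
    rw [ih, Nat.factorial_succ]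
    push_cast
    ring

-- product of range(2, n+1) is also n!
lemma pvProdRange2 : ∀ n : Nat,
    (PySem.List.pyRange 2 ((n : Int) + 1) 1).foldl (fun acc i => acc * i) 1 = (n.factorial : Int)
  | 0 => by decide
  | (m + 1) => by
    have h := pvProdRange1 (m + 1)
    rw [PySem.List.pyRange_one_cons (by push_cast; omega)] at h
    simpa using h

-- range (m * f) splits into m blocks of f
lemma pvRangeMul (m f : Nat) :
    List.range (m * f) = (List.range m).flatMap (fun i => (List.range f).map (fun r => i * f + r)) := by
  induction m with
  | zero => simp
  | succ k ih =>
    rw [Nat.succ_mul, List.range_add, ih, List.range_succ, List.flatMap_append]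
    simp

lemma pvFlatMapAttach {a b : Type} (l : List a) (f : a → List b) :
    l.attach.flatMap (fun x => f x.1) = l.flatMap f := by
  conv_rhs => rw [← List.attach_map_subtype_val l]
  rw [List.flatMap_map]

-- one decoding step of pvKth on a nonempty list
lemma pvKth_step (m : Nat) (x : Int) (rest : List Int) (hlen : rest.length = m)
    (i r : Nat) (hi : i < m + 1) (hr : r < m.factorial) :
    pvKth (m + 1) (x :: rest) ((i * m.factorial + r : Nat) : Int)
      = (x :: rest).getD i 0 ::
        pvKth m ((x :: rest).take i ++ (x :: rest).drop (i + 1)) ((r : Nat) : Int) := by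
  have hfpos : (0 : Int) < (m.factorial : Int) := by exact_mod_cast m.factorial_pos
  have hf : (PySem.List.pyRange 1 (((x :: rest).length : Int)) 1).foldl (fun acc i => acc * i) 1
      = (m.factorial : Int) := by
    rw [List.length_cons, hlen]; push_cast; exact pvProdRange1 m
  have hd : PySem.Int.floordiv ((i * m.factorial + r : Nat) : Int) ((m.factorial : Nat) : Int) = (i : Int) := by
    rw [PySem.Int.floordiv_eq_iff_of_pos hfpos]
    constructor
    · push_cast; nlinarith
    · push_cast; nlinarith
  have hmod : PySem.Int.mod ((i * m.factorial + r : Nat) : Int) ((m.factorial : Nat) : Int) = (r : Int) := by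
    have h := PySem.Int.floordiv_mul_add_mod ((i * m.factorial + r : Nat) : Int) ((m.factorial : Nat) : Int)
    rw [hd] at h
    push_cast at h ⊢
    linarith
  have hg : PySem.List.pyGet? (x :: rest) ((i : Nat) : Int) = some ((x :: rest).getD i 0) := by
    rw [PySem.List.pyGet?_natCast, List.getElem?_eq_getElem (by simp [hlen]; omega),
      List.getD_eq_getElem _ 0 (by simp [hlen]; omega)]
  show pvKth (m + 1) (x :: rest) _ = _
  rw [pvKth]
  simp only [hf, hd, hmod, hg, Option.getD_some]
  rw [show ((i : Int) + 1) = (((i + 1 : Nat) : Nat) : Int) by push_cast; ring]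
  rw [PySem.List.slice_to_natCast, PySem.List.slice_from_natCast]

-- core: decoding every k < n! reproduces the recursive permutation list
lemma pvKth_eq : ∀ (n : Nat) (xs : List Int), xs.length = n →
    (List.range n.factorial).map (fun j : Nat => pvKth n xs (j : Int)) = pvPermsA xs := by
  intro n
  induction n with
  | zero =>
    intro xs hx
    rw [List.length_eq_zero_iff.mp hx, pvPermsA]
    decide
  | succ m ih =>
    intro xs hx
    obtain ⟨x, rest, rfl⟩ : ∃ x rest, xs = x :: rest := by
      cases xs with
      | nil => simp at hx
      | cons a l => exact ⟨a, l, rfl⟩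
    have hlen : rest.length = m := by simpa using hx
    rw [Nat.factorial_succ, pvRangeMul (m + 1) m.factorial, List.map_flatMap]
    rw [pvPermsA]
    rw [pvFlatMapAttach (List.range (x :: rest).length)
      (fun i => (pvPermsA ((x :: rest).take i ++ (x :: rest).drop (i + 1))).map
        (fun p => (x :: rest).getD i 0 :: p))]
    rw [List.length_cons, hlen]
    rw [List.flatMap_def, List.flatMap_def]
    congr 1
    apply List.map_congr_left
    intro i hi
    rw [List.mem_range] at hi
    rw [List.map_map]
    have hys : ((x :: rest).take i ++ (x :: rest).drop (i + 1)).length = m := by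
      simp [List.length_take, List.length_drop, hlen]; omega
    rw [← ih _ hys, List.map_map]
    apply List.map_congr_left
    intro r hr
    rw [List.mem_range] at hr
    simp only [Function.comp]
    exact pvKth_step m x rest hlen i r hi hr

-- ===== VERDICT (by name: the statement is the Claim_ definition above) =====
theorem permute_sublist_spec : Claim_equal_permute_sublist := by
  intro lst start end_ _ _
  unfold Spec_permute_sublist
  simp only [permute_sublist, permute_sublist_alt]
  rw [PySem.List.foldl_append_singleton_eq_map, pvProdRange2, PySem.List.pyRange_zero_nat,
    List.map_map, ← pvKth_eq (PySem.List.slice lst (some start) (some end_)).length _ rfl,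
    List.map_map]
  simp [Function.comp]
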